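-- pv_equiv track=rewrite | github.com/dostiny/Python | Python/CODETREE/001_함수를이용한369게임.py | tsn
-- ===== SOURCE A (Python) =====
-- def tsn(s, e):
--     cnt = 0
--     for i in range(s, e+1):
--         if i % 3 == 0:
--             cnt += 1
--         else :
--             for j in str(i):
--                 if j == '3' or j == '6' or j == '9':
--                     cnt += 1
--     return cnt
-- ===== SOURCE B (Python) =====
-- def tsn(s, e):
--     if e < s:
--         return 0
--     # multiples of 3 in [s, e] counted in closed form
--     claps = e // 3 - (s - 1) // 3
--     for i in range(s, e + 1):
--         if i % 3:
--             n = abs(i)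
--             while n:
--                 n, d = divmod(n, 10)
--                 if d in (3, 6, 9):
--                     claps += 1
--     return claps
-- ===== Notes on version B (the rewrite author's own statement) =====
-- stated objective: alternative
-- what changed: B counts the multiples of 3 in [s,e] with a closed-form floor-division formula instead of testing each i, and counts 3/6/9 digits of the remaining numbers by arithmetic divmod extraction on abs(i) instead of iterating over str(i).
import Mathlib
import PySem

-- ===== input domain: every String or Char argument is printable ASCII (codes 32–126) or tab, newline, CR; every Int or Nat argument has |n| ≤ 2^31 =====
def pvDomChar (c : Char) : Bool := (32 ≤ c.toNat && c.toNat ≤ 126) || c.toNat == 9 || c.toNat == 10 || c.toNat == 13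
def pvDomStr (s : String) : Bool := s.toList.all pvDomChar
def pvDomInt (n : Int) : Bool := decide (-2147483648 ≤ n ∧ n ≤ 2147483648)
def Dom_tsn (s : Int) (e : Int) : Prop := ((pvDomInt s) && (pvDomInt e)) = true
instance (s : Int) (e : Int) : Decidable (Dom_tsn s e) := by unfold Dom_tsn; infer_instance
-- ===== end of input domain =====

-- B replaces the per-number string scan by arithmetic digit extraction and counts the
-- multiples of 3 in closed form instead of testing each i (objective: alternative).


-- ===== PORT A =====
def tsn (s : Int) (e : Int) : Int :=
  (PySem.List.pyRange s (e + 1) 1).foldl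
    (fun cnt i =>
      if PySem.Int.mod i 3 == 0 then cnt + 1
      else (PySem.Int.toChars i).foldl
        (fun cnt j => if j == '3' || j == '6' || j == '9' then cnt + 1 else cnt) cnt)
    0

-- ===== PORT B =====
-- 'while n: n, d = divmod(n, 10); …' runs on n = abs(i) ≥ 0, so it is ported on Nat
-- (Python's // and % agree with Nat division on nonnegative arguments; exact).
def digCount369 (n : Nat) : Int :=
  if h : n = 0 then 0
  else (if n % 10 == 3 || n % 10 == 6 || n % 10 == 9 then 1 else 0) + digCount369 (n / 10)
decreasing_by exact Nat.div_lt_self (Nat.pos_of_ne_zero h) (by omega)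

def tsn_alt (s : Int) (e : Int) : Int :=
  if e < s then 0
  else
    (PySem.List.pyRange s (e + 1) 1).foldl
      (fun claps i =>
        if PySem.Int.mod i 3 == 0 then claps else claps + digCount369 i.natAbs)
      (PySem.Int.floordiv e 3 - PySem.Int.floordiv (s - 1) 3)

-- ===== PRECONDITION & SPEC =====
def Spec_tsn (s : Int) (e : Int) (out : Int) : Prop := out = tsn_alt s e
instance (s : Int) (e : Int) (out : Int) : Decidable (Spec_tsn s e out) := by unfold Spec_tsn; infer_instance

-- ===== CLAIM (what is proved, stated in full; the proofs are below) =====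
def Claim_equal_tsn : Prop := ∀ (s : Int) (e : Int), Dom_tsn s e → Spec_tsn s e (tsn s e)

-- ===== LEMMAS AND PROOFS =====

def p369 (j : Char) : Bool := j == '3' || j == '6' || j == '9'

lemma digCount369_zero : digCount369 0 = 0 := by
  rw [digCount369]; simp

lemma digCount369_pos (n : Nat) (hn : n ≠ 0) :
    digCount369 n
      = (if (n % 10 == 3 || n % 10 == 6 || n % 10 == 9) = true then (1 : Int) else 0)
        + digCount369 (n / 10) := by
  rw [digCount369]; simp [hn]

lemma p369_digitChar (m : Nat) (h : m < 10) :
    p369 (Nat.digitChar m) = (m == 3 || m == 6 || m == 9) := by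
  interval_cases m <;> decide

lemma countP_toDigitsCore : ∀ (fuel n : Nat) (ds : List Char), n < fuel →
    (List.countP p369 (Nat.toDigitsCore 10 fuel n ds) : Int)
      = digCount369 n + (List.countP p369 ds : Int) := by
  intro fuel
  induction fuel with
  | zero => intro n ds h; omega
  | succ f ih =>
    intro n ds h
    rw [Nat.toDigitsCore]
    by_cases h0 : n / 10 = 0
    · simp only [h0, if_true, List.countP_cons]
      rw [p369_digitChar (n % 10) (Nat.mod_lt _ (by omega))]
      by_cases hn : n = 0
      · subst hn; simp [digCount369_zero]
      · rw [digCount369_pos n hn, h0, digCount369_zero]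
        by_cases hd : (n % 10 == 3 || n % 10 == 6 || n % 10 == 9) = true <;> simp [hd] <;> ring
    · simp only [h0, if_false]
      rw [ih (n / 10) _ (by omega), List.countP_cons]
      rw [p369_digitChar (n % 10) (Nat.mod_lt _ (by omega))]
      rw [digCount369_pos n (by omega)]
      by_cases hd : (n % 10 == 3 || n % 10 == 6 || n % 10 == 9) = true <;> simp [hd] <;> ring

lemma countP_toDigits (n : Nat) :
    (List.countP p369 (Nat.toDigits 10 n) : Int) = digCount369 n := by
  have := countP_toDigitsCore (n + 1) n [] (by omega)
  simpa [Nat.toDigits] using this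

lemma countP_toChars (i : Int) :
    (List.countP p369 (PySem.Int.toChars i) : Int) = digCount369 i.natAbs := by
  unfold PySem.Int.toChars
  by_cases hi : i < 0
  · simp only [hi, if_true, List.countP_cons]
    have h1 : p369 '-' = false := by decide
    rw [h1]
    simpa using countP_toDigits i.natAbs
  · simp only [hi, if_false]
    have h2 : i.toNat = i.natAbs := by omega
    rw [h2, countP_toDigits]

lemma floordiv_step3 (m : Int) :
    PySem.Int.floordiv m 3 = PySem.Int.floordiv (m - 1) 3 + (if 3 ∣ m then 1 else 0) := by
  rw [PySem.Int.floordiv_eq_ediv_of_pos (by omega), PySem.Int.floordiv_eq_ediv_of_pos (by omega)]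
  split_ifs with h <;> omega

lemma sum_ind3 (s : Int) : ∀ (n : Nat),
    ((PySem.List.pyRange s (s + n) 1).map
        (fun i => if PySem.Int.mod i 3 == 0 then (1 : Int) else 0)).sum
      = PySem.Int.floordiv (s + n - 1) 3 - PySem.Int.floordiv (s - 1) 3 := by
  intro n
  induction n with
  | zero =>
    rw [show s + ((0 : Nat) : Int) = s by push_cast; ring]
    rw [PySem.List.pyRange_one_eq_nil (le_refl s)]
    simp
  | succ k ih =>
    have hcast : s + ((k + 1 : Nat) : Int) = (s + k) + 1 := by push_cast; ring
    rw [hcast, PySem.List.pyRange_one_succ_right (by omega)]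
    rw [List.map_append, List.sum_append, ih]
    have hmod : (PySem.Int.mod (s + k) 3 == 0) = decide (3 ∣ (s + (k : Int))) := by
      by_cases hd : 3 ∣ (s + (k : Int))
      · simp [hd]
      · have hne : PySem.Int.mod (s + k) 3 ≠ 0 := fun hc =>
          hd ((PySem.Int.mod_eq_zero_iff_dvd (s + k) 3).mp hc)
        simp [hd]
    simp only [List.map_cons, List.map_nil, List.sum_cons, List.sum_nil, hmod]
    have h1 : s + (k : Int) + 1 - 1 = s + (k : Int) := by ring
    rw [h1, floordiv_step3 (s + (k : Int))]
    by_cases hd : 3 ∣ (s + (k : Int)) <;> simp [hd]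
    ring

lemma foldA (cs : List Char) (cnt : Int) :
    cs.foldl (fun cnt j => if j == '3' || j == '6' || j == '9' then cnt + 1 else cnt) cnt
      = cnt + (List.countP p369 cs : Int) :=
  PySem.List.foldl_count_if p369 cs cnt

lemma stepA_eq (cnt : Int) (i : Int) :
    (if PySem.Int.mod i 3 == 0 then cnt + 1
     else (PySem.Int.toChars i).foldl
       (fun cnt j => if j == '3' || j == '6' || j == '9' then cnt + 1 else cnt) cnt)
    = cnt + ((if PySem.Int.mod i 3 == 0 then (1 : Int) else 0)
             + (if PySem.Int.mod i 3 == 0 then (0 : Int) else digCount369 i.natAbs)) := by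
  by_cases h : (PySem.Int.mod i 3 == 0) = true
  · rw [if_pos h, if_pos h, if_pos h]; ring
  · rw [if_neg h, if_neg h, if_neg h, foldA, countP_toChars]; ring

lemma tsn_eq_of_le (s e : Int) (hse : s ≤ e) : tsn s e = tsn_alt s e := by
  unfold tsn tsn_alt
  rw [if_neg (by omega)]
  have hA : (fun (cnt i : Int) =>
      if PySem.Int.mod i 3 == 0 then cnt + 1
      else (PySem.Int.toChars i).foldl
        (fun cnt j => if j == '3' || j == '6' || j == '9' then cnt + 1 else cnt) cnt)
    = fun (cnt i : Int) => cnt +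
        ((if PySem.Int.mod i 3 == 0 then (1 : Int) else 0)
         + (if PySem.Int.mod i 3 == 0 then (0 : Int) else digCount369 i.natAbs)) := by
    funext cnt i; exact stepA_eq cnt i
  have hB : (fun (claps i : Int) =>
      if PySem.Int.mod i 3 == 0 then claps else claps + digCount369 i.natAbs)
    = fun (claps i : Int) => claps +
        (if PySem.Int.mod i 3 == 0 then (0 : Int) else digCount369 i.natAbs) := by
    funext claps i
    by_cases h : (PySem.Int.mod i 3 == 0) = true
    · rw [if_pos h, if_pos h]; ring
    · rw [if_neg h, if_neg h]
  rw [hA, hB, PySem.List.foldl_add, PySem.List.foldl_add]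
  rw [PySem.List.sum_map_add_int]
  have hn : s + (((e + 1 - s).toNat : Nat) : Int) = e + 1 := by omega
  have hs := sum_ind3 s (e + 1 - s).toNat
  rw [hn] at hs
  rw [show (e + 1 - 1 : Int) = e from by ring] at hs
  rw [hs]
  ring

-- ===== VERDICT (by name: the statement is the Claim_ definition above) =====
theorem tsn_spec : Claim_equal_tsn := by
  intro s e _
  unfold Spec_tsn
  by_cases hse : s ≤ e
  · exact tsn_eq_of_le s e hse
  · unfold tsn tsn_alt
    rw [PySem.List.pyRange_one_eq_nil (by omega), if_pos (by omega)]
    rfl
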